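-- pv_equiv track=rewrite | github.com/polishyankee/python-korki | Szyfrowanie/Przestawieniowe/kolumnowe.py | sekwencjaKlucza
-- ===== SOURCE A (Python) =====
-- def sekwencjaKlucza(klucz):
--   sekwencja = []
--   for pos, ch in enumerate(klucz):
--     poprzednieLitery = klucz[:pos]
--     nowyNumer = 1
--     for prevPos, prevCh in enumerate(poprzednieLitery):
--       if prevCh > ch:
--         sekwencja[prevPos] += 1
--       else:
--         nowyNumer += 1
--     sekwencja.append(nowyNumer)
--   return sekwencja
-- ===== SOURCE B (Python) =====
-- def sekwencjaKlucza(klucz):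
--     # Rank of each character: 1 + number of positions that come strictly
--     # before it in a stable sort by character, computed directly per index.
--     return [1 + sum(1 for j, d in enumerate(klucz) if d < c or (d == c and j < i))
--             for i, c in enumerate(klucz)]
-- ===== Notes on version B (the rewrite author's own statement) =====
-- stated objective: simpler
-- what changed: A builds the ranks incrementally, mutating all earlier entries (+1) while scanning each prefix; B computes each rank independently as 1 plus a direct count of positions (j,d) with d < c or (d == c and j < i), with no mutation and no prefix slicing.
import Mathlib
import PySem

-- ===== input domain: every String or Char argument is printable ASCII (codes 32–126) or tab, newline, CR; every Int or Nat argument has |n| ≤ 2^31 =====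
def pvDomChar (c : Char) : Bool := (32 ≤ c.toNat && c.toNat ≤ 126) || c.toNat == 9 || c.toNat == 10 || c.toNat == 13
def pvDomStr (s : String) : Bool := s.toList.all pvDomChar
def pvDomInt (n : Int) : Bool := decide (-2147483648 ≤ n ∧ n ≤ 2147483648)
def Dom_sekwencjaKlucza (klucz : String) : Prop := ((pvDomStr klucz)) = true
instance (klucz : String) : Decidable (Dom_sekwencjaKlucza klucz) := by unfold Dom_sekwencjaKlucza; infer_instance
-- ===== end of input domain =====

-- B replaces A's incremental rank maintenance (in-place +1 updates of earlier entries)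
-- by a direct per-position count of smaller (char, index) pairs: simpler, no mutation; same O(n^2) cost.

-- ===== PORT A =====
-- inner loop 'for prevPos, prevCh in enumerate(poprzednieLitery): …' over state (sekwencja, nowyNumer);
-- 'sekwencja[prevPos] += 1' is pyGetD/pySetD (prevPos is always in range: sekwencja has one entry per previous letter)
def pvAInner (ch : Char) (prev : List Char) (sek : List Int) : List Int × Int :=
  (PySem.List.enumerate prev).foldl
    (fun st pc =>
      if ch < pc.2 then (PySem.List.pySetD st.1 pc.1 (PySem.List.pyGetD st.1 pc.1 0 + 1), st.2)
      else (st.1, st.2 + 1))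
    (sek, 1)

-- outer loop 'for pos, ch in enumerate(klucz)'; 'klucz[:pos]' is the slice of the character list
def sekwencjaKlucza (klucz : String) : List Int :=
  (PySem.List.enumerate klucz.toList).foldl
    (fun sek pc =>
      let poprzednieLitery := PySem.List.slice klucz.toList none (some pc.1)
      let r := pvAInner pc.2 poprzednieLitery sek
      r.1 ++ [r.2])
    []

-- ===== PORT B =====
-- '[1 + sum(1 for j, d in enumerate(klucz) if d < c or (d == c and j < i)) for i, c in enumerate(klucz)]'
def sekwencjaKlucza_alt (klucz : String) : List Int :=
  (PySem.List.enumerate klucz.toList).map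
    (fun ic =>
      1 + (PySem.List.enumerate klucz.toList).foldl
        (fun acc jd => if jd.2 < ic.2 ∨ (jd.2 = ic.2 ∧ jd.1 < ic.1) then acc + 1 else acc) 0)

-- ===== PRECONDITION & SPEC =====
def Spec_sekwencjaKlucza (klucz : String) (out : List Int) : Prop := out = sekwencjaKlucza_alt klucz
instance (klucz : String) (out : List Int) : Decidable (Spec_sekwencjaKlucza klucz out) := by unfold Spec_sekwencjaKlucza; infer_instance

-- ===== CLAIM (what is proved, stated in full; the proofs are below) =====
def Claim_equal_sekwencjaKlucza : Prop := ∀ (klucz : String), Dom_sekwencjaKlucza klucz → Spec_sekwencjaKlucza klucz (sekwencjaKlucza klucz)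

-- ===== LEMMAS AND PROOFS =====

-- B's value on a character list (proof-side view of sekwencjaKlucza_alt)
def pvB (l : List Char) : List Int :=
  (PySem.List.enumerate l).map
    (fun ic =>
      1 + (PySem.List.enumerate l).foldl
        (fun acc jd => if jd.2 < ic.2 ∨ (jd.2 = ic.2 ∧ jd.1 < ic.1) then acc + 1 else acc) 0)

-- A's value on a character list
def pvA (l : List Char) : List Int :=
  (PySem.List.enumerate l).foldl
    (fun sek pc =>
      let prev := PySem.List.slice l none (some pc.1)
      let r := pvAInner pc.2 prev sek
      r.1 ++ [r.2])
    []

lemma pvA_eq (klucz : String) : sekwencjaKlucza klucz = pvA klucz.toList := rfl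
lemma pvB_eq (klucz : String) : sekwencjaKlucza_alt klucz = pvB klucz.toList := rfl

lemma enumerate_append {α : Type} (xs ys : List α) (s : Int) :
    PySem.List.enumerate (xs ++ ys) s
      = PySem.List.enumerate xs s ++ PySem.List.enumerate ys (s + xs.length) := by
  induction xs generalizing s with
  | nil => simp [PySem.List.enumerate_nil]
  | cons x xs ih =>
      simp [PySem.List.enumerate_cons, ih, add_comm]
      ring_nf

lemma mem_enumerate_bounds {α : Type} (l : List α) (s : Int) (p : Int × α)
    (h : p ∈ PySem.List.enumerate l s) : s ≤ p.1 ∧ p.1 < s + l.length := by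
  induction l generalizing s with
  | nil => simp [PySem.List.enumerate_nil] at h
  | cons x xs ih =>
      rw [PySem.List.enumerate_cons, List.mem_cons] at h
      rcases h with h | h
      · rw [h]
        refine ⟨le_refl s, ?_⟩
        simp only [List.length_cons]
        push_cast
        omega
      · have := ih (s + 1) h
        simp only [List.length_cons]
        push_cast at this ⊢
        omega

lemma inner_general (ch : Char) (prev : List Char) (done sek : List Int) (n : Int)
    (h : sek.length = prev.length) :
    (PySem.List.enumerate prev (done.length : Int)).foldl
      (fun st pc =>
        if ch < pc.2 then (PySem.List.pySetD st.1 pc.1 (PySem.List.pyGetD st.1 pc.1 0 + 1), st.2)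
        else (st.1, st.2 + 1))
      (done ++ sek, n)
    = (done ++ List.zipWith (fun d x => if ch < d then x + 1 else x) prev sek,
       n + (prev.countP (fun d => !(decide (ch < d))) : Int)) := by
  induction prev generalizing done sek n with
  | nil =>
      cases sek with
      | nil => simp [PySem.List.enumerate_nil]
      | cons x xs => simp at h
  | cons d prev ih =>
      cases sek with
      | nil => simp at h
      | cons x sek =>
        rw [PySem.List.enumerate_cons]
        simp only [List.foldl_cons]
        by_cases hd : ch < d
        · have hget : PySem.List.pyGetD (done ++ x :: sek) (done.length : Int) 0 = x := by
            rw [PySem.List.pyGetD_eq_getElem _ _ (by positivity) (by simp)]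
            simp
          have hset : PySem.List.pySetD (done ++ x :: sek) (done.length : Int) (x + 1)
              = done ++ (x + 1) :: sek := by
            rw [PySem.List.pySetD_of_nonneg _ _ (by positivity)]
            simp
          have := ih (done ++ [x + 1]) sek n (by simpa using Nat.succ_injective h)
          simp only [List.length_append, List.length_singleton] at this
          simp only [hd, if_pos, hget, hset]
          rw [show ((done.length : Int) + 1) = (((done.length + 1 : Nat)) : Int) by push_cast; ring]
          rw [show done ++ (x + 1) :: sek = (done ++ [x + 1]) ++ sek by simp]
          rw [this]
          simp [hd]
        · have := ih (done ++ [x]) sek (n + 1) (by simpa using Nat.succ_injective h)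
          simp only [List.length_append, List.length_singleton] at this
          simp only [hd, if_false]
          rw [show ((done.length : Int) + 1) = (((done.length + 1 : Nat)) : Int) by push_cast; ring]
          rw [show done ++ x :: sek = (done ++ [x]) ++ sek by simp]
          rw [this]
          simp [hd]
          ring

lemma pvAInner_eq (ch : Char) (prev : List Char) (sek : List Int)
    (h : sek.length = prev.length) :
    pvAInner ch prev sek
      = (List.zipWith (fun d x => if ch < d then x + 1 else x) prev sek,
         1 + (prev.countP (fun d => !(decide (ch < d))) : Int)) := by
  have := inner_general ch prev [] sek 1 h
  simpa [pvAInner] using this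

lemma length_pvB (l : List Char) : (pvB l).length = l.length := by
  simp [pvB, PySem.List.length_enumerate]

lemma zipWith_map_enumerate (g : Char → Int → Int) (F : Int × Char → Int)
    (l : List Char) (s : Int) :
    List.zipWith g l ((PySem.List.enumerate l s).map F)
      = (PySem.List.enumerate l s).map (fun p => g p.2 (F p)) := by
  induction l generalizing s with
  | nil => simp [PySem.List.enumerate_nil]
  | cons x xs ih => simp [PySem.List.enumerate_cons, ih]

lemma count_snd (q : Char → Bool) (l : List Char) (s : Int) (a : Int) :
    (PySem.List.enumerate l s).foldl
      (fun acc jd => if q jd.2 then acc + 1 else acc) a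
      = a + (l.countP q : Int) := by
  have h1 : (((PySem.List.enumerate l s).map (fun p => p.2)).foldl
      (fun acc x => if q x then acc + 1 else acc) a)
      = (PySem.List.enumerate l s).foldl
        (fun acc jd => if q jd.2 then acc + 1 else acc) a := List.foldl_map
  rw [PySem.List.map_snd_enumerate] at h1
  rw [← h1, PySem.List.foldl_count_if]

lemma char_le_iff (d c : Char) : (d < c ∨ d = c) ↔ ¬ c < d := by
  constructor
  · rintro (h | rfl) h2
    · exact absurd (h.trans h2) (lt_irrefl d)
    · exact lt_irrefl d h2
  · intro h
    rcases lt_trichotomy d c with h1 | h1 | h1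
    · exact Or.inl h1
    · exact Or.inr h1
    · exact absurd h1 h

lemma pvB_append (t : List Char) (c : Char) :
    pvB (t ++ [c])
      = List.zipWith (fun d x => if c < d then x + 1 else x) t (pvB t)
        ++ [1 + (t.countP (fun d => !(decide (c < d))) : Int)] := by
  have henum : PySem.List.enumerate (t ++ [c]) 0
      = PySem.List.enumerate t 0 ++ [((t.length : Int), c)] := by
    rw [enumerate_append]
    simp [PySem.List.enumerate_cons, PySem.List.enumerate_nil]
  unfold pvB
  rw [henum, List.map_append, zipWith_map_enumerate]
  congr 1
  · apply List.map_congr_left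
    intro p hp
    have hb := mem_enumerate_bounds t 0 p hp
    rw [List.foldl_append]
    simp only [List.foldl_cons, List.foldl_nil]
    have hfalse : ¬ (c = p.2 ∧ (t.length : Int) < p.1) := by
      rintro ⟨_, hlt⟩
      omega
    by_cases hc : c < p.2
    · simp [hc, hfalse]
      ring
    · simp [hc, hfalse]
  · simp only [List.map_cons, List.map_nil]
    rw [List.foldl_append]
    simp only [List.foldl_cons, List.foldl_nil]
    rw [if_neg (show ¬ (c < c ∨ True ∧ (t.length : Int) < (t.length : Int)) by simp)]
    have hrw : List.foldl
        (fun acc jd => if jd.2 < c ∨ (jd.2 = c ∧ jd.1 < (t.length : Int)) then acc + 1 else acc)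
        (0 : Int) (PySem.List.enumerate t 0)
        = List.foldl
        (fun acc jd => if !(decide (c < jd.2)) then acc + 1 else acc)
        (0 : Int) (PySem.List.enumerate t 0) := by
      apply PySem.List.foldl_congr_mem
      intro acc x hx
      have hb := mem_enumerate_bounds t 0 x hx
      have hiff : (x.2 < c ∨ (x.2 = c ∧ x.1 < (t.length : Int))) ↔ ¬ c < x.2 := by
        rw [← char_le_iff x.2 c]
        constructor
        · rintro (h | ⟨h, _⟩)
          · exact Or.inl h
          · exact Or.inr h
        · rintro (h | h)
          · exact Or.inl h
          · exact Or.inr ⟨h, by omega⟩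
      by_cases hc : c < x.2
      · rw [if_neg (fun h => (hiff.mp h) hc), if_neg (by simp [hc])]
      · rw [if_pos (hiff.mpr hc), if_pos (by simp [hc])]
    rw [hrw, count_snd (fun d => !(decide (c < d))) t 0 0]
    simp

lemma pvA_eq_pvB (l : List Char) : pvA l = pvB l := by
  induction l using List.reverseRecOn with
  | nil => rfl
  | append_singleton t c ih =>
      have henum : PySem.List.enumerate (t ++ [c]) 0
          = PySem.List.enumerate t 0 ++ [((t.length : Int), c)] := by
        rw [enumerate_append]
        simp [PySem.List.enumerate_cons, PySem.List.enumerate_nil]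
      unfold pvA
      rw [henum, List.foldl_append]
      simp only [List.foldl_cons, List.foldl_nil]
      have hcongr : List.foldl
          (fun sek pc =>
            let prev := PySem.List.slice (t ++ [c]) none (some pc.1)
            let r := pvAInner pc.2 prev sek
            r.1 ++ [r.2]) [] (PySem.List.enumerate t 0)
          = List.foldl
          (fun sek pc =>
            let prev := PySem.List.slice t none (some pc.1)
            let r := pvAInner pc.2 prev sek
            r.1 ++ [r.2]) [] (PySem.List.enumerate t 0) := by
        apply PySem.List.foldl_congr_mem
        intro acc x hx
        have hb := mem_enumerate_bounds t 0 x hx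
        have hslice : PySem.List.slice (t ++ [c]) none (some x.1)
            = PySem.List.slice t none (some x.1) := by
          rw [PySem.List.slice_to _ (by omega), PySem.List.slice_to _ (by omega)]
          rw [List.take_append]
          have : x.1.toNat - t.length = 0 := by omega
          rw [this]
          simp
        rw [hslice]
      rw [hcongr]
      have hA : List.foldl
          (fun sek pc =>
            let prev := PySem.List.slice t none (some pc.1)
            let r := pvAInner pc.2 prev sek
            r.1 ++ [r.2]) [] (PySem.List.enumerate t 0) = pvA t := rfl
      rw [hA, ih]
      have hslast : PySem.List.slice (t ++ [c]) none (some (t.length : Int)) = t := by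
        rw [PySem.List.slice_to_natCast]
        exact List.take_left
      simp only [hslast]
      rw [pvB_append]
      simp [pvAInner_eq c t (pvB t) (length_pvB t)]

-- ===== VERDICT (by name: the statement is the Claim_ definition above) =====
theorem sekwencjaKlucza_spec : Claim_equal_sekwencjaKlucza := by
  intro klucz _
  unfold Spec_sekwencjaKlucza
  rw [pvA_eq, pvB_eq, pvA_eq_pvB]
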